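-- pv_equiv track=rewrite | github.com/0202alcc/luvatrix | gateflow/src/gateflow/render.py | _render_board_markdown
-- ===== SOURCE A (Python) =====
-- def _render_board_markdown(tasks: list[dict]) -> str:
--     by_status = _tasks_by_status(tasks)
--     lines = [
--         "| Status | Tasks |",
--         "| --- | --- |",
--     ]
--     for status in sorted(by_status):
--         rows = by_status[status]
--         if rows:
--             packed = "<br>".join(f"{row.get('id', '-')}: {row.get('title', '-')}" for row in rows)
--         else:
--             packed = "(empty)"
--         lines.append(f"| {status} | {packed} |")
--     return "\n".join(lines) + "\n"
--
-- def _tasks_by_status(tasks: list[dict]) -> dict[str, list[dict]]: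
--     by_status: dict[str, list[dict]] = {}
--     for row in tasks:
--         status = str(row.get("status", "Intake"))
--         by_status.setdefault(status, []).append(row)
--     for status_rows in by_status.values():
--         status_rows.sort(key=lambda row: str(row.get("id", "")))
--     return by_status
-- ===== SOURCE B (Python) =====
-- def _render_board_markdown(tasks: list[dict]) -> str:
--     statuses = sorted({str(r.get("status", "Intake")) for r in tasks})
--     body = [
--         "| {} | {} |".format(
--             status,
--             "<br>".join(
--                 "{}: {}".format(r.get("id", "-"), r.get("title", "-"))
--                 for r in sorted(
--                     (r for r in tasks if str(r.get("status", "Intake")) == status),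
--                     key=lambda r: str(r.get("id", "")),
--                 )
--             ),
--         )
--         for status in statuses
--     ]
--     return "\n".join(["| Status | Tasks |", "| --- | --- |"] + body) + "\n"
-- ===== Notes on version B (the rewrite author's own statement) =====
-- stated objective: simpler
-- what changed: Replaces the mutable dict-of-lists index (setdefault/append, then per-bucket in-place sorts, then keyed lookups) with a direct comprehension: sorted set of statuses, and for each status a filter-and-sort over the task list.
import Mathlib
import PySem

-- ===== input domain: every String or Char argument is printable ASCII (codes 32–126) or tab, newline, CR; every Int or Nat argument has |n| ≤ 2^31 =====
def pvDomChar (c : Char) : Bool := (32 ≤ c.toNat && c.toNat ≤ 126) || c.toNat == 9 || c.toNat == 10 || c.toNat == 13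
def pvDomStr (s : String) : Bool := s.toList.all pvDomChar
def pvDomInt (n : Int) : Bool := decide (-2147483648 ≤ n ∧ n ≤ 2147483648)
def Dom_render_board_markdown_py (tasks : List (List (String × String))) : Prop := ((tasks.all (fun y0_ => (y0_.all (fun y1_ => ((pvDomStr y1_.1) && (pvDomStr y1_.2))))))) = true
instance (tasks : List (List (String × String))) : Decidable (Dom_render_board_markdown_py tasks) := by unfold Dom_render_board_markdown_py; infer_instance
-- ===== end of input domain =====

-- B replaces A's mutable dict-of-lists index with a sorted set of statuses and a
-- per-status filter-and-sort comprehension (objective: simpler / more direct).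

-- row.get(k, dflt) on a Python dict row (association list, first match wins)
def pvGet (row : List (String × String)) (k dflt : String) : String :=
  (PySem.Dict.mk row).getD k dflt

-- ===== PORT A =====
-- _tasks_by_status: dict built by setdefault(status, []).append(row), then each
-- value list sorted in place by str(row.get('id','')) (ported as a map over items).
def tasks_by_status_py (tasks : List (List (String × String))) :
    PySem.Dict String (List (List (String × String))) :=
  let by_status := tasks.foldl
    (fun d row => d.modify (pvGet row "status" "Intake") [] (fun v => v ++ [row]))
    PySem.Dict.empty
  PySem.Dict.mk (by_status.items.map
    (fun p => (p.1, PySem.List.sorted p.2 (fun row => pvGet row "id" "") false)))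

def render_board_markdown_py (tasks : List (List (String × String))) : String :=
  let by_status := tasks_by_status_py tasks
  let lines : List String := ["| Status | Tasks |", "| --- | --- |"]
  let lines := (PySem.List.sorted by_status.keys (fun s => s) false).foldl
    (fun lines status =>
      let rows := by_status.getD status []  -- by_status[status]; every iterated key is present
      let packed := if rows ≠ [] then
          PySem.Str.join "<br>" (rows.map
            (fun row => pvGet row "id" "-" ++ ": " ++ pvGet row "title" "-"))
        else "(empty)"
      lines ++ ["| " ++ status ++ " | " ++ packed ++ " |"]) lines
  PySem.Str.join "\n" lines ++ "\n"

-- ===== PORT B =====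
def render_board_markdown_py_alt (tasks : List (List (String × String))) : String :=
  let statuses := PySem.List.sorted
    (PySem.Set.ofList (tasks.map (fun row => pvGet row "status" "Intake")))
    (fun s => s) false
  let body := statuses.map (fun status =>
    let rows := PySem.List.sorted
      (tasks.filter (fun row => pvGet row "status" "Intake" == status))
      (fun row => pvGet row "id" "") false
    "| " ++ status ++ " | " ++
      PySem.Str.join "<br>" (rows.map
        (fun row => pvGet row "id" "-" ++ ": " ++ pvGet row "title" "-")) ++ " |")
  PySem.Str.join "\n" (["| Status | Tasks |", "| --- | --- |"] ++ body) ++ "\n"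

-- ===== PRECONDITION & SPEC =====
def Spec_render_board_markdown_py (tasks : List (List (String × String))) (out : String) : Prop := out = render_board_markdown_py_alt tasks
instance (tasks : List (List (String × String))) (out : String) : Decidable (Spec_render_board_markdown_py tasks out) := by unfold Spec_render_board_markdown_py; infer_instance

-- ===== CLAIM (what is proved, stated in full; the proofs are below) =====
def Claim_equal_render_board_markdown_py : Prop := ∀ (tasks : List (List (String × String))), Dom_render_board_markdown_py tasks → Spec_render_board_markdown_py tasks (render_board_markdown_py tasks)

-- ===== LEMMAS AND PROOFS =====

-- the grouping fold, written with the key projection factored out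
lemma pv_fold_eq (tasks : List (List (String × String))) :
    tasks.foldl
      (fun d row => d.modify (pvGet row "status" "Intake") [] (fun v => v ++ [row]))
      PySem.Dict.empty
    = (tasks.map (fun r => (pvGet r "status" "Intake", r))).foldl
        (fun d p => d.modify p.1 [] (fun v => v ++ [p.2])) PySem.Dict.empty := by
  rw [List.foldl_map]

lemma pv_keys (tasks : List (List (String × String))) :
    (tasks.foldl
      (fun d row => d.modify (pvGet row "status" "Intake") [] (fun v => v ++ [row]))
      PySem.Dict.empty).keys
    = PySem.Set.ofList (tasks.map (fun r => pvGet r "status" "Intake")) := by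
  rw [PySem.Dict.keys_foldl_modify_key]
  simp [PySem.Dict.keys_empty, PySem.Set.update_nil_left]

lemma pv_getD (tasks : List (List (String × String))) (s : String) :
    (tasks.foldl
      (fun d row => d.modify (pvGet row "status" "Intake") [] (fun v => v ++ [row]))
      PySem.Dict.empty).getD s []
    = tasks.filter (fun r => pvGet r "status" "Intake" == s) := by
  rw [pv_fold_eq, PySem.Dict.getD_foldl_modify_append]
  simp only [PySem.Dict.getD_empty, List.nil_append, List.filter_map, List.map_map]
  simp [Function.comp_def]

-- lookup through the value-sorting map over items
lemma pv_get?_mk_map {ν : Type} (g : ν → ν) (l : List (String × ν)) (k : String) :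
    (PySem.Dict.mk (l.map (fun p => (p.1, g p.2)))).get? k
    = ((PySem.Dict.mk l).get? k).map g := by
  induction l with
  | nil => simp [PySem.Dict.get?]
  | cons p t ih =>
      obtain ⟨a, b⟩ := p
      simp only [List.map_cons, PySem.Dict.get?_mk_cons]
      by_cases h : (a == k) = true
      · simp [h]
      · simp [h, ih]

lemma pv_getD_eq (d : PySem.Dict String (List (List (String × String))))
    (g : List (List (String × String)) → List (List (String × String))) (s : String)
    (hg : g [] = ([] : List (List (String × String)))) :
    (PySem.Dict.mk (d.items.map (fun p => (p.1, g p.2)))).getD s [] = g (d.getD s []) := by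
  rw [PySem.Dict.getD_eq_get?_getD, PySem.Dict.getD_eq_get?_getD]
  have : (PySem.Dict.mk (d.items.map (fun p => (p.1, g p.2)))).get? s = (d.get? s).map g := by
    have := pv_get?_mk_map g d.items s
    simpa [PySem.Dict.items] using this
  rw [this]
  cases d.get? s <;> simp [hg]

-- ===== VERDICT (by name: the statement is the Claim_ definition above) =====
theorem render_board_markdown_py_spec : Claim_equal_render_board_markdown_py := by
  intro tasks _
  unfold Spec_render_board_markdown_py render_board_markdown_py render_board_markdown_py_alt tasks_by_status_py
  simp only [PySem.List.foldl_append_singleton_eq_map]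
  have hkeys : (PySem.Dict.mk
      ((tasks.foldl
        (fun d row => d.modify (pvGet row "status" "Intake") [] (fun v => v ++ [row]))
        PySem.Dict.empty).items.map
        (fun p => (p.1, PySem.List.sorted p.2 (fun row => pvGet row "id" "") false)))).keys
      = PySem.Set.ofList (tasks.map (fun r => pvGet r "status" "Intake")) := by
    have h1 := pv_keys tasks
    simp only [PySem.Dict.keys] at h1 ⊢
    simp only [List.map_map, Function.comp_def]
    exact h1
  rw [hkeys]
  refine congrArg (fun t => PySem.Str.join "\n" t ++ "\n") ?_
  refine congrArg (fun t => ["| Status | Tasks |", "| --- | --- |"] ++ t) ?_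
  apply List.map_congr_left
  intro s hs
  have hmem : s ∈ tasks.map (fun r => pvGet r "status" "Intake") := by
    have := (PySem.List.mem_sorted _ _ _ _).mp hs
    simpa [PySem.Set.mem_ofList] using this
  have hrows : (PySem.Dict.mk
      ((tasks.foldl
        (fun d row => d.modify (pvGet row "status" "Intake") [] (fun v => v ++ [row]))
        PySem.Dict.empty).items.map
        (fun p => (p.1, PySem.List.sorted p.2 (fun row => pvGet row "id" "") false)))).getD s []
      = PySem.List.sorted (tasks.filter (fun r => pvGet r "status" "Intake" == s))
          (fun row => pvGet row "id" "") false := by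
    have h2 := pv_getD_eq
      (tasks.foldl
        (fun d row => d.modify (pvGet row "status" "Intake") [] (fun v => v ++ [row]))
        PySem.Dict.empty)
      (fun v => PySem.List.sorted v (fun row => pvGet row "id" "") false) s rfl
    simpa [pv_getD] using h2
  have hne : tasks.filter (fun r => pvGet r "status" "Intake" == s) ≠ [] := by
    obtain ⟨r, hr, hsr⟩ := List.mem_map.mp hmem
    intro h
    have := List.filter_eq_nil_iff.mp h r hr
    simp [hsr] at this
  have hsne : PySem.List.sorted (tasks.filter (fun r => pvGet r "status" "Intake" == s))
      (fun row => pvGet row "id" "") false ≠ [] := by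
    simpa [PySem.List.sorted_eq_nil_iff] using hne
  simp only [hrows, if_pos hsne]
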